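-- pv_equiv track=rewrite | github.com/TheorieLearn/TheorieLearn | questions/fooling_sets/coding/1_0n_1n_suffix/tests/language_definition.py | isInLanguage
-- ===== SOURCE A (Python) =====
-- def isInLanguage(x: str) -> bool:
--     def has_correct_suffix(string: str) -> bool:
--         n = len(string) // 2
--         for length in range(1, n + 1):
--             suffix_len = 1 + 2 * length
--             actual_suffix = string[-1 * suffix_len :]
--             correct_suffix = "1" + "0" * length + "1" * length
--             if actual_suffix == correct_suffix:
--                 return True
--         return False
--
--     return has_correct_suffix(x) and (x.count("0") + x.count("1") == len(x))
-- ===== SOURCE B (Python) =====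
-- def isInLanguage(x: str) -> bool:
--     # A word is in the language iff it is binary and ends with 1 0^L 1^L for some L >= 1.
--     # The trailing run of '1's determines the only possible L, so one scan suffices.
--     r = x[::-1]
--     t = 0
--     while t < len(r) and r[t] == '1':
--         t += 1
--     z = t
--     while z < len(r) and r[z] == '0':
--         z += 1
--     return (t >= 1 and z - t == t and z < len(r) and r[z] == '1'
--             and all(c in '01' for c in x))
-- ===== Notes on version B (the rewrite author's own statement) =====
-- stated objective: faster
-- what changed: Instead of trying every candidate run length L and rebuilding/comparing a suffix string for each (quadratic), B observes that the trailing run of '1's determines the only possible L and verifies the single candidate suffix in one scan.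
import Mathlib
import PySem

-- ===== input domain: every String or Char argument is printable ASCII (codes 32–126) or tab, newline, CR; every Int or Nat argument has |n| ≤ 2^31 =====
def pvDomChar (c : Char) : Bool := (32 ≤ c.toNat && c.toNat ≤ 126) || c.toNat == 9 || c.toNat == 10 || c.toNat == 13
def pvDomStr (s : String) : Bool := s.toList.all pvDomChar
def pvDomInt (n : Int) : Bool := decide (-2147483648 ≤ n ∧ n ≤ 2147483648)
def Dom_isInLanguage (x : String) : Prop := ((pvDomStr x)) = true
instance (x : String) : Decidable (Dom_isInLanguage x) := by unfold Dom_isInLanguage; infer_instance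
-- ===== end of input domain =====

-- B replaces A's loop over every candidate run length L (rebuilding and comparing a
-- suffix for each) by a single scan: the trailing run of '1's fixes the only possible L.


-- ===== PORT A =====
-- correct_suffix = "1" + "0" * length + "1" * length
def pvCorrect (m : Nat) : List Char := '1' :: (List.replicate m '0' ++ List.replicate m '1')

-- the 'for length in range(1, n + 1)' loop with early return
def pvALoop (s : List Char) : List Int → Bool
  | [] => false
  | L :: rest =>
    if PySem.List.slice s (some (-1 * (1 + 2 * L))) none = pvCorrect L.toNat then true
    else pvALoop s rest

def isInLanguage (x : String) : Bool :=
  let s := x.toList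
  pvALoop s (PySem.List.pyRange 1 (PySem.Int.floordiv (s.length : Int) 2 + 1) 1)
    && (PySem.Chars.count s ['0'] + PySem.Chars.count s ['1'] == s.length)

-- ===== PORT B =====
-- length of the run of character c at the head of the list (B's while loops)
def pvRun (c : Char) : List Char → Nat
  | [] => 0
  | a :: as => if a = c then pvRun c as + 1 else 0

-- 'z < len(r) and r[z] == '1''
def pvHead1 : List Char → Bool
  | [] => false
  | c :: _ => c == '1'

def isInLanguage_alt (x : String) : Bool :=
  let r := x.toList.reverse
  let t := pvRun '1' r
  let zeros := pvRun '0' (r.drop t)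
  decide (1 ≤ t) && (zeros == t) && pvHead1 (r.drop (t + zeros))
    && x.toList.all (fun c => c == '0' || c == '1')

-- ===== PRECONDITION & SPEC =====
def Spec_isInLanguage (x : String) (out : Bool) : Prop := out = isInLanguage_alt x
instance (x : String) (out : Bool) : Decidable (Spec_isInLanguage x out) := by unfold Spec_isInLanguage; infer_instance

-- ===== CLAIM (what is proved, stated in full; the proofs are below) =====
def Claim_equal_isInLanguage : Prop := ∀ (x : String), Dom_isInLanguage x → Spec_isInLanguage x (isInLanguage x)

-- ===== LEMMAS AND PROOFS =====

-- the reverse of pvCorrect m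
def pvCorrRev (m : Nat) : List Char := List.replicate m '1' ++ List.replicate m '0' ++ ['1']

theorem pvCorrect_reverse (m : Nat) : (pvCorrect m).reverse = pvCorrRev m := by
  simp [pvCorrect, pvCorrRev, List.reverse_append]

theorem pvCorrect_length (m : Nat) : (pvCorrect m).length = 2 * m + 1 := by
  simp [pvCorrect]; omega

-- Chars.count with a single-character needle is List.count
theorem pvCount_go_singleton (c : Char) (l : List Char) :
    ∀ (fuel acc : Nat), l.length ≤ fuel →
      PySem.Chars.count.go [c] fuel l acc = acc + l.count c := by
  induction l with
  | nil => intro fuel acc _; cases fuel <;> simp [PySem.Chars.count.go]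
  | cons a as ih =>
    intro fuel acc hf
    cases fuel with
    | zero => simp at hf
    | succ f =>
      simp only [PySem.Chars.count.go]
      by_cases hac : a = c
      · subst hac
        have hpre : List.isPrefixOf [a] (a :: as) = true := by
          simp [List.isPrefixOf]
        simp only [hpre]
        rw [show List.drop (List.length [a]) (a :: as) = as by simp]
        rw [ih f (acc + 1) (by simpa using hf)]
        simp
        omega
      · have hpre : List.isPrefixOf [c] (a :: as) = false := by
          simp [List.isPrefixOf]
          exact fun h => absurd h.symm hac
        simp only [hpre]
        rw [if_neg (by simp)]
        rw [ih f acc (by simpa using hf)]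
        simp [hac]

theorem pvCount_singleton (s : List Char) (c : Char) :
    PySem.Chars.count s [c] = s.count c := by
  have he : ([c] : List Char).isEmpty = false := rfl
  simp only [PySem.Chars.count, he, Bool.false_eq_true, if_false]
  rw [pvCount_go_singleton c s s.length 0 le_rfl]
  omega

-- A's binary check (count equality) equals B's (all characters in '01')
theorem pvCount01_le (s : List Char) : s.count '0' + s.count '1' ≤ s.length := by
  induction s with
  | nil => simp
  | cons a as ih =>
    simp only [List.count_cons, List.length_cons]
    by_cases ha0 : a = '0' <;> by_cases ha1 : a = '1' <;>
      simp_all [beq_iff_eq] <;> omega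

theorem pvBinary_prop (s : List Char) :
    s.count '0' + s.count '1' = s.length ↔ ∀ c ∈ s, c = '0' ∨ c = '1' := by
  induction s with
  | nil => simp
  | cons a as ih =>
    have h01 := pvCount01_le as
    simp only [List.count_cons, List.length_cons, List.mem_cons, forall_eq_or_imp, ← ih,
      beq_iff_eq]
    by_cases ha0 : a = '0'
    · subst ha0; simp; omega
    · by_cases ha1 : a = '1'
      · subst ha1; simp; omega
      · simp [ha0, ha1]; omega

theorem pvBinary_eq (s : List Char) :
    (PySem.Chars.count s ['0'] + PySem.Chars.count s ['1'] == s.length)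
      = s.all (fun c => c == '0' || c == '1') := by
  rw [pvCount_singleton, pvCount_singleton]
  rcases hb : s.all (fun c => c == '0' || c == '1') with _ | _
  · rw [beq_eq_false_iff_ne]
    intro hc
    have := (pvBinary_prop s).mp hc
    rw [← Bool.not_eq_true] at hb
    exact hb (by simpa [List.all_eq_true, Bool.or_eq_true, beq_iff_eq] using this)
  · rw [beq_iff_eq]
    apply (pvBinary_prop s).mpr
    simpa [List.all_eq_true, Bool.or_eq_true, beq_iff_eq] using hb

-- the loop returns true iff some element of the list matches
theorem pvALoop_iff (s : List Char) (lst : List Int) :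
    pvALoop s lst = true ↔
      ∃ L ∈ lst, PySem.List.slice s (some (-1 * (1 + 2 * L))) none = pvCorrect L.toNat := by
  induction lst with
  | nil => simp [pvALoop]
  | cons L rest ih =>
    unfold pvALoop
    constructor
    · intro htrue
      by_cases h : PySem.List.slice s (some (-1 * (1 + 2 * L))) none = pvCorrect L.toNat
      · exact ⟨L, List.mem_cons_self, h⟩
      · rw [if_neg h] at htrue
        obtain ⟨L', hm, hc⟩ := ih.mp htrue
        exact ⟨L', List.mem_cons_of_mem L hm, hc⟩
    · rintro ⟨L', hm, hc⟩
      rcases List.mem_cons.mp hm with hL | hL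
      · rw [if_pos (hL ▸ hc)]
      · by_cases h : PySem.List.slice s (some (-1 * (1 + 2 * L))) none = pvCorrect L.toNat
        · rw [if_pos h]
        · rw [if_neg h]
          exact ih.mpr ⟨L', hL, hc⟩

-- one slice comparison, rephrased on the reversed list
theorem pvSlice_iff (s : List Char) (m : Nat) (hm : 1 ≤ m) :
    PySem.List.slice s (some (-1 * (1 + 2 * (m : Int)))) none = pvCorrect m ↔
      (s.reverse.take (2 * m + 1) = pvCorrRev m ∧ 2 * m + 1 ≤ s.length) := by
  have hcast : -1 * (1 + 2 * (m : Int)) = -((2 * m + 1 : Nat) : Int) := by push_cast; ring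
  rw [hcast, PySem.List.slice_from_neg_natCast s (2 * m + 1) (by omega)]
  constructor
  · intro h
    have hlen : (List.drop (s.length - (2 * m + 1)) s).length = 2 * m + 1 := by
      rw [h, pvCorrect_length]
    have hle : 2 * m + 1 ≤ s.length := by
      simp [List.length_drop] at hlen; omega
    refine ⟨?_, hle⟩
    have := congrArg List.reverse h
    rw [List.reverse_drop, pvCorrect_reverse] at this
    rwa [show s.length - (s.length - (2 * m + 1)) = 2 * m + 1 by omega] at this
  · rintro ⟨h, hle⟩
    have h2 : (List.drop (s.length - (2 * m + 1)) s).reverse = pvCorrRev m := by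
      rw [List.reverse_drop, show s.length - (s.length - (2 * m + 1)) = 2 * m + 1 by omega, h]
    rw [← List.reverse_reverse (List.drop (s.length - (2 * m + 1)) s), h2,
        ← pvCorrect_reverse, List.reverse_reverse]

-- basic facts about pvRun
theorem pvRun_take (c : Char) (v : List Char) :
    v.take (pvRun c v) = List.replicate (pvRun c v) c := by
  induction v with
  | nil => simp [pvRun]
  | cons a as ih =>
    by_cases h : a = c
    · subst h; simp [pvRun, List.replicate_succ, ih]
    · simp [pvRun, h]

theorem pvRun_replicate_append (c : Char) (k : Nat) (w : List Char) :
    pvRun c (List.replicate k c ++ w) = k + pvRun c w := by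
  induction k with
  | zero => simp
  | succ n ih => simp [List.replicate_succ, pvRun, ih]; omega

theorem pvRun_cons_ne (c a : Char) (w : List Char) (h : a ≠ c) :
    pvRun c (a :: w) = 0 := by
  simp [pvRun, h]

theorem pvRun_replicate_ne (c d : Char) (k : Nat) (w : List Char) (h : d ≠ c) :
    pvRun c (List.replicate (k + 1) d ++ w) = 0 := by
  simp [List.replicate_succ, pvRun, h]

-- B's suffix test, characterised by the same existential as A's loop
theorem pvB_iff (r : List Char) :
    (decide (1 ≤ pvRun '1' r) && (pvRun '0' (r.drop (pvRun '1' r)) == pvRun '1' r)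
        && pvHead1 (r.drop (pvRun '1' r + pvRun '0' (r.drop (pvRun '1' r))))) = true ↔
      ∃ m, 1 ≤ m ∧ r.take (2 * m + 1) = pvCorrRev m ∧ 2 * m + 1 ≤ r.length := by
  constructor
  · intro h
    simp only [Bool.and_eq_true, decide_eq_true_eq, beq_iff_eq] at h
    obtain ⟨⟨ht, hz⟩, hh⟩ := h
    set t := pvRun '1' r with htdef
    obtain ⟨rest, hrest⟩ : ∃ rest, r.drop (t + t) = '1' :: rest := by
      rw [← hz]
      cases hd : r.drop (t + pvRun '0' (r.drop t)) with
      | nil => rw [hd] at hh; simp [pvHead1] at hh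
      | cons c cs =>
        rw [hd] at hh; simp [pvHead1] at hh
        exact ⟨cs, by rw [hz] at hd ⊢; rw [hd, hh]⟩
    refine ⟨t, ht, ?_, ?_⟩
    · have e1 : r.take t = List.replicate t '1' := pvRun_take '1' r
      have e2 : (r.drop t).take t = List.replicate t '0' := by
        have e := pvRun_take '0' (r.drop t)
        rwa [hz] at e
      have e3 : (r.drop t).drop t = '1' :: rest := by
        rw [List.drop_drop]; rwa [Nat.add_comm]
      rw [show 2 * t + 1 = t + (t + 1) by omega, List.take_add, List.take_add, e1, e2, e3]
      simp [pvCorrRev]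
    · have : (r.drop (t + t)).length = r.length - (t + t) := List.length_drop
      rw [hrest] at this
      simp at this
      omega
  · rintro ⟨m, hm, htake, hle⟩
    have hr : r = List.replicate m '1' ++ (List.replicate m '0' ++ '1' :: r.drop (2 * m + 1)) := by
      conv_lhs => rw [← List.take_append_drop (2 * m + 1) r]
      rw [htake]
      simp [pvCorrRev]
    obtain ⟨k, hk⟩ : ∃ k, m = k + 1 := ⟨m - 1, by omega⟩
    have ht : pvRun '1' r = m := by
      conv_lhs => rw [hr]
      rw [pvRun_replicate_append, hk, pvRun_replicate_ne '1' '0' k _ (by decide)]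
    have hdropt : r.drop m = List.replicate m '0' ++ '1' :: r.drop (2 * m + 1) := by
      conv_lhs => rw [hr]
      exact List.drop_left' (by simp)
    have hz : pvRun '0' (r.drop m) = m := by
      rw [hdropt, pvRun_replicate_append, pvRun_cons_ne '0' '1' _ (by decide)]
      omega
    have hdrop2 : r.drop (m + m) = '1' :: r.drop (2 * m + 1) := by
      rw [← List.drop_drop, hdropt]
      exact List.drop_left' (by simp)
    simp only [Bool.and_eq_true, decide_eq_true_eq, beq_iff_eq]
    rw [ht, hz, hdrop2]
    refine ⟨⟨by omega, rfl⟩, ?_⟩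
    simp [pvHead1]

-- A's loop over range(1, n//2 + 1) matches the same existential
theorem pvA_iff (s : List Char) :
    pvALoop s (PySem.List.pyRange 1 (PySem.Int.floordiv (s.length : Int) 2 + 1) 1) = true ↔
      ∃ m, 1 ≤ m ∧ s.reverse.take (2 * m + 1) = pvCorrRev m ∧ 2 * m + 1 ≤ s.length := by
  rw [pvALoop_iff]
  constructor
  · rintro ⟨L, hmem, hsl⟩
    rw [PySem.List.mem_pyRange_one] at hmem
    obtain ⟨hL1, _⟩ := hmem
    have hLm : L = ((L.toNat : Nat) : Int) := by omega
    have h1 : 1 ≤ L.toNat := by omega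
    rw [hLm] at hsl
    simp only [Int.toNat_natCast] at hsl
    rw [pvSlice_iff s L.toNat h1] at hsl
    exact ⟨L.toNat, h1, hsl.1, hsl.2⟩
  · rintro ⟨m, hm, htake, hle⟩
    refine ⟨(m : Int), ?_, ?_⟩
    · rw [PySem.List.mem_pyRange_one]
      constructor
      · omega
      · have hfd : PySem.Int.floordiv (s.length : Int) 2 = ((s.length / 2 : Nat) : Int) := by
          exact_mod_cast PySem.Int.floordiv_natCast s.length 2
        rw [hfd]
        have : m ≤ s.length / 2 := by omega
        omega
    · rw [show ((m : Int)).toNat = m by omega, pvSlice_iff s m hm]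
      exact ⟨htake, hle⟩

-- ===== VERDICT (by name: the statement is the Claim_ definition above) =====
theorem isInLanguage_spec : Claim_equal_isInLanguage := by
  unfold Claim_equal_isInLanguage
  intro x _
  unfold Spec_isInLanguage isInLanguage isInLanguage_alt
  simp only []
  rw [pvBinary_eq]
  congr 1
  have hA := pvA_iff x.toList
  have hB := pvB_iff x.toList.reverse
  rw [List.length_reverse] at hB
  cases hA' : pvALoop x.toList
      (PySem.List.pyRange 1 (PySem.Int.floordiv (x.toList.length : Int) 2 + 1) 1) with
  | false =>
    symm
    rw [← Bool.not_eq_true] at hA' ⊢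
    intro hb
    exact hA' (hA.mpr (hB.mp hb))
  | true =>
    symm
    exact hB.mpr (hA.mp hA')
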